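-- pv_equiv track=rewrite | github.com/Bezdelnik2021/test_task | lucky.py | lucky_series
-- ===== SOURCE A (Python) =====
-- def lucky_series(num):
--     result = []
--     while num > 0:
--         result.append(num % 10)
--         num //= 10
--
--     max_series = [0]
--     temp_series = []
--
--     for i in result:
--         if i in [5, 6]:
--             temp_series.append(i)
--             if len(max_series) < len(temp_series) and len(set(temp_series)) > 1:
--                 max_series = temp_series
--         else:
--             temp_series = []
--
--     return sum(n * 10 ** i for i, n in enumerate(max_series))
-- ===== SOURCE B (Python) =====
-- def lucky_series(num):
--     if num <= 0:
--         return 0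
--     # collect all maximal runs of 5/6 digits, in string order, most-significant-first
--     runs = []
--     cur = []
--     for ch in str(num):
--         if ch in '56':
--             cur.append(int(ch))
--         else:
--             if cur:
--                 runs.append(cur)
--             cur = []
--     if cur:
--         runs.append(cur)
--     # pick the longest run containing both digits; ties go to the rightmost run
--     best = []
--     for run in runs:
--         if 5 in run and 6 in run and len(run) >= len(best):
--             best = run
--     value = 0
--     for d in best:
--         value = value * 10 + d
--     return value
-- ===== Notes on version B (the rewrite author's own statement) =====
-- stated objective: idiomatic
-- what changed: B guards num<=0, walks str(num) once most-significant-first to materialise the list of maximal 5/6-digit runs, then selects the longest mixed run (>= so the run nearest the units digit wins ties) and rebuilds its value with a Horner loop, instead of A's reversed modulo-digit extraction with an online best-tracker that relies on list aliasing (max_series = temp_series) and a positional power sum.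
import Mathlib
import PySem

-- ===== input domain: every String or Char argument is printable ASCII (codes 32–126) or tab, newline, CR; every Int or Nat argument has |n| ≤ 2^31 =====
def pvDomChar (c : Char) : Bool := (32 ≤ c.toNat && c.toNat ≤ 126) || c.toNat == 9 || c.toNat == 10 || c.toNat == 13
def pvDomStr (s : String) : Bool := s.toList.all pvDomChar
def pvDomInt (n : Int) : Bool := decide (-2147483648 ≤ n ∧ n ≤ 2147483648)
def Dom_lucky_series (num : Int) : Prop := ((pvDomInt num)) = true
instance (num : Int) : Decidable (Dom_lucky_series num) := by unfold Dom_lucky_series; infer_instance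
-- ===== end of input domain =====

-- B re-groups the digits of str(num) into maximal 5/6-runs and selects the best one, instead of
-- A's reversed modulo-digit extraction with an online alias-based best tracker (objective: idiomatic).

-- ===== PORT A =====

-- the 'while num > 0: result.append(num % 10); num //= 10' loop (units digit first)
def luckyDigitsRev (num : Int) : List Int :=
  if h : 0 < num then
    PySem.Int.mod num 10 :: luckyDigitsRev (PySem.Int.floordiv num 10)
  else []
termination_by num.toNat
decreasing_by
  have h10 : PySem.Int.floordiv num 10 = num / 10 := by
    have := Int.fdiv_eq_ediv_of_nonneg (a := num) (b := 10) (by omega)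
    simp [PySem.Int.floordiv, this]
  rw [h10]; omega

-- one iteration of A's 'for i in result' loop.  Python's 'max_series = temp_series' makes the two
-- variables ALIASES of one list object until 'temp_series = []' rebinds; the Bool flag models
-- "max_series is currently the same object as temp_series", so the current value of max_series is
-- 'if al then temp else maxS'.
def luckyStep (st : List Int × List Int × Bool) (i : Int) : List Int × List Int × Bool :=
  match st with
  | (maxS, temp, al) =>
    if i = 5 ∨ i = 6 then
      let temp' := temp ++ [i]
      let eff := if al then temp' else maxS      -- value of max_series after the append
      if eff.length < temp'.length ∧ 1 < PySem.Set.len (PySem.Set.ofList temp') then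
        (maxS, temp', true)                      -- max_series = temp_series (now aliased)
      else (maxS, temp', al)
    else ((if al then temp else maxS), [], false)

def lucky_series (num : Int) : Int :=
  let result := luckyDigitsRev num
  let st := result.foldl luckyStep ([0], [], false)
  let maxSeries := if st.2.2 then st.2.1 else st.1
  -- sum(n * 10 ** i for i, n in enumerate(max_series)); enumerate indices are ≥ 0, so ^ i.toNat is exact
  (PySem.List.enumerate maxSeries).foldl (fun acc p => acc + p.2 * 10 ^ p.1.toNat) 0

-- ===== PORT B =====

def lucky_series_alt (num : Int) : Int :=
  if num ≤ 0 then 0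
  else
    -- for ch in str(num): group consecutive 5/6 digits into runs (int(ch) on a guarded digit char)
    let st := (PySem.Int.toStr num).toList.foldl
      (fun (st : List (List Int) × List Int) ch =>
        if ch = '5' ∨ ch = '6' then (st.1, st.2 ++ [(PySem.Int.ofChars? [ch]).getD 0])
        else (if st.2 ≠ [] then st.1 ++ [st.2] else st.1, []))
      ([], [])
    let runs := if st.2 ≠ [] then st.1 ++ [st.2] else st.1
    let best := runs.foldl
      (fun best run => if (5 : Int) ∈ run ∧ (6 : Int) ∈ run ∧ best.length ≤ run.length then run else best)
      []
    best.foldl (fun v d => v * 10 + d) 0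

-- ===== PRECONDITION & SPEC =====
def Spec_lucky_series (num : Int) (out : Int) : Prop := out = lucky_series_alt num
instance (num : Int) (out : Int) : Decidable (Spec_lucky_series num out) := by unfold Spec_lucky_series; infer_instance

-- ===== CLAIM (what is proved, stated in full; the proofs are below) =====
def Claim_equal_lucky_series : Prop := ∀ (num : Int), Dom_lucky_series num → Spec_lucky_series num (lucky_series num)

-- ===== LEMMAS AND PROOFS =====

-- predicate "digit is lucky"
def isL (d : Int) : Bool := decide (d = 5 ∨ d = 6)

-- reference grouping: maximal runs of lucky digits, in list order
def refRuns (l : List Int) : List (List Int) :=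
  match l with
  | [] => []
  | d :: t =>
    if isL d then (d :: t.takeWhile isL) :: refRuns (t.dropWhile isL)
    else refRuns t
termination_by l.length
decreasing_by
  · simpa using Nat.lt_succ_of_le (List.length_dropWhile_le isL t)
  · simp

-- last best run (string order, ties to the later = rightmost run)
def bestG (rs : List (List Int)) : List Int :=
  rs.foldr (fun r b => if (5 : Int) ∈ r ∧ (6 : Int) ∈ r ∧ b.length ≤ r.length then r else b) []

-- value of a units-first digit list
def reconV (u : List Int) : Int := u.foldr (fun d v => d + 10 * v) 0

-- first best run with strict improvement (units-first processing order, as A does)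
def aSel (m : List Int) (rs : List (List Int)) : List Int :=
  rs.foldl (fun b r => if (5 : Int) ∈ r ∧ (6 : Int) ∈ r ∧ b.length < r.length then r else b) m

-- pure (char-free) form of B's run builder
def bStep (st : List (List Int) × List Int) (d : Int) : List (List Int) × List Int :=
  if isL d then (st.1, st.2 ++ [d])
  else (if st.2 ≠ [] then st.1 ++ [st.2] else st.1, [])

-- ---- digit extraction vs decimal digits ----

lemma dropWhile_head_false {p : Int → Bool} : ∀ (l : List Int) (a : Int) (r : List Int),
    l.dropWhile p = a :: r → p a = false := by
  intro l
  induction l with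
  | nil => intro a r h; simp at h
  | cons x t ih =>
    intro a r h
    by_cases hx : p x
    · rw [List.dropWhile_cons_of_pos hx] at h; exact ih _ _ h
    · rw [List.dropWhile_cons_of_neg hx] at h
      cases h; simpa using hx

lemma nodup_const_len (c : Int) : ∀ (l : List Int), l.Nodup → (∀ x ∈ l, x = c) →
    l.length ≤ 1 := by
  intro l
  match l with
  | [] => intro _ _; simp
  | [a] => intro _ _; simp
  | a :: b :: t =>
    intro hnd hc
    exfalso
    have ha : a = c := hc a (by simp)
    have hb : b = c := hc b (by simp)
    have : a ∉ b :: t := (List.nodup_cons.mp hnd).1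
    exact this (by simp [ha, hb])

lemma digitsRev_eq (num : Int) (h : 0 < num) :
    luckyDigitsRev num = (Nat.digits 10 num.toNat).map Int.ofNat := by
  have H : ∀ (n : Nat) (num : Int), num.toNat = n → 0 < num →
      luckyDigitsRev num = (Nat.digits 10 num.toNat).map Int.ofNat := by
    intro n
    induction n using Nat.strong_induction_on with
    | _ n ih =>
      intro num hn hpos
      rw [luckyDigitsRev, dif_pos hpos]
      have hmod : PySem.Int.mod num 10 = (Int.ofNat (num.toNat % 10)) := by
        have hf : num.fmod 10 = num % 10 := by rw [Int.fmod_eq_emod]; simp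
        simp only [PySem.Int.mod, hf, Int.ofNat_eq_natCast]
        omega
      have hdiv : PySem.Int.floordiv num 10 = ((num.toNat / 10 : Nat) : Int) := by
        have he : num.fdiv 10 = num / 10 := Int.fdiv_eq_ediv_of_nonneg num (by omega)
        simp only [PySem.Int.floordiv, he]
        omega
      rw [Nat.digits_def' (by norm_num : (1:Nat) < 10) (by omega : 0 < num.toNat),
        List.map_cons, hmod]
      by_cases h0 : num.toNat / 10 = 0
      · have hz : luckyDigitsRev (PySem.Int.floordiv num 10) = [] := by
          rw [luckyDigitsRev, hdiv, h0]; simp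
        rw [hz, h0]
        simp
      · have hlt : num.toNat / 10 < n := by omega
        have hrec := ih _ hlt (PySem.Int.floordiv num 10)
          (by rw [hdiv]; omega) (by rw [hdiv]; omega)
        have htn : (PySem.Int.floordiv num 10).toNat = num.toNat / 10 := by rw [hdiv]; omega
        rw [hrec, htn]
  exact H num.toNat num rfl h

lemma toDigitsCore_eq (f : Nat) : ∀ (n : Nat) (acc : List Char), 0 < n → n < 10 ^ f →
    Nat.toDigitsCore 10 f n acc = ((Nat.digits 10 n).map Nat.digitChar).reverse ++ acc := by
  induction f with
  | zero => intro n acc h1 h2; omega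
  | succ f ih =>
    intro n acc h1 h2
    simp only [Nat.toDigitsCore]
    rw [Nat.digits_def' (by norm_num : (1:Nat) < 10) h1]
    by_cases h0 : n / 10 = 0
    · rw [if_pos h0, h0, Nat.digits_zero]
      simp
    · rw [if_neg h0]
      have hlt : n / 10 < 10 ^ f := by
        have : n < 10 ^ f * 10 := by rw [← pow_succ]; exact h2
        omega
      rw [ih (n / 10) _ (by omega) hlt]
      simp

lemma toChars_eq (num : Int) (h : 0 < num) :
    PySem.Int.toChars num = ((Nat.digits 10 num.toNat).map Nat.digitChar).reverse := by
  have hneg : ¬ num < 0 := by omega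
  simp only [PySem.Int.toChars, hneg, if_neg, Nat.toDigits]
  rw [toDigitsCore_eq (num.toNat + 1) num.toNat [] (by omega)
    (lt_of_lt_of_le (Nat.lt_pow_self (by norm_num)) (Nat.pow_le_pow_right (by norm_num) (Nat.le_succ _)))]
  simp

-- ---- per-run behaviour of A's loop ----

lemma two_le_length_of_mixed (u : List Int) (h5 : (5 : Int) ∈ u) (h6 : (6 : Int) ∈ u) :
    2 ≤ u.length := by
  rcases u with _ | ⟨a, _ | ⟨b, t⟩⟩
  · simp at h5
  · simp at h5 h6; omega
  · simp [List.length_cons]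

lemma setlen_mixed (u : List Int) (hu : ∀ x ∈ u, x = 5 ∨ x = 6) :
    (1 < PySem.Set.len (PySem.Set.ofList u)) ↔ ((5 : Int) ∈ u ∧ (6 : Int) ∈ u) := by
  have hlen : PySem.Set.len (PySem.Set.ofList u) = ((PySem.Set.ofList u).length : Int) := rfl
  rw [hlen]
  constructor
  · intro hgt
    by_contra hc
    have hone : (PySem.Set.ofList u).length ≤ 1 := by
      rcases not_and_or.mp hc with h5 | h6
      · exact nodup_const_len 6 _ (PySem.Set.nodup_ofList u)
          (fun x hx => by
            rcases hu x ((PySem.Set.mem_ofList _ _).mp hx) with h | h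
            · subst h; exact absurd ((PySem.Set.mem_ofList _ _).mp hx) h5
            · exact h)
      · exact nodup_const_len 5 _ (PySem.Set.nodup_ofList u)
          (fun x hx => by
            rcases hu x ((PySem.Set.mem_ofList _ _).mp hx) with h | h
            · exact h
            · subst h; exact absurd ((PySem.Set.mem_ofList _ _).mp hx) h6)
    omega
  · intro ⟨h5, h6⟩
    have := two_le_length_of_mixed (PySem.Set.ofList u)
      ((PySem.Set.mem_ofList _ _).mpr h5) ((PySem.Set.mem_ofList _ _).mpr h6)
    omega

lemma foldl_step_aliased (r : List Int) : ∀ (m t : List Int), (∀ x ∈ r, isL x) →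
    r.foldl luckyStep (m, t, true) = (m, t ++ r, true) := by
  induction r with
  | nil => intro m t _; simp
  | cons d r ih =>
    intro m t h
    have hd : d = 5 ∨ d = 6 := by have := h d (by simp); simpa [isL] using this
    simp only [List.foldl_cons, luckyStep, hd, if_pos]
    have hlen : ¬ ((t ++ [d]).length < (t ++ [d]).length ∧
        1 < PySem.Set.len (PySem.Set.ofList (t ++ [d]))) := by
      intro hc; exact absurd hc.1 (lt_irrefl _)
    simp only [hlen, if_neg, reduceIte, ite_self]
    rw [ih m (t ++ [d]) (fun x hx => h x (by simp [hx]))]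
    simp

lemma foldl_step_run (r : List Int) : ∀ (m t : List Int), r ≠ [] → (∀ x ∈ r, isL x) →
    (∀ x ∈ t, isL x) →
    r.foldl luckyStep (m, t, false) =
      (m, t ++ r, decide (m.length < (t ++ r).length ∧ (5 : Int) ∈ t ++ r ∧ (6 : Int) ∈ t ++ r)) := by
  induction r with
  | nil => intro m t hne _ _; exact absurd rfl hne
  | cons d r' ih =>
    intro m t _ hr ht
    have hd : d = 5 ∨ d = 6 := by have := hr d (by simp); simpa [isL] using this
    have htd : ∀ x ∈ t ++ [d], x = 5 ∨ x = 6 := by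
      intro x hx
      rcases List.mem_append.mp hx with h | h
      · have := ht x h; simpa [isL] using this
      · simp at h; subst h; exact hd
    have hstep : luckyStep (m, t, false) d =
        (if m.length < (t ++ [d]).length ∧ 1 < PySem.Set.len (PySem.Set.ofList (t ++ [d])) then
          (m, t ++ [d], true) else (m, t ++ [d], false)) := by
      simp only [luckyStep, hd, if_pos, Bool.false_eq_true, if_false]
    simp only [List.foldl_cons, hstep]
    by_cases hC : m.length < (t ++ [d]).length ∧ 1 < PySem.Set.len (PySem.Set.ofList (t ++ [d]))
    · rw [if_pos hC, foldl_step_aliased r' m (t ++ [d])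
        (fun x hx => hr x (by simp [hx]))]
      have hmix := (setlen_mixed (t ++ [d]) htd).mp hC.2
      have hassoc : (t ++ [d]) ++ r' = t ++ d :: r' := by simp
      have h5 : (5 : Int) ∈ t ++ d :: r' := by
        have := hmix.1; simp only [List.mem_append, List.mem_cons, List.mem_singleton] at this ⊢
        tauto
      have h6 : (6 : Int) ∈ t ++ d :: r' := by
        have := hmix.2; simp only [List.mem_append, List.mem_cons, List.mem_singleton] at this ⊢
        tauto
      have hlen : m.length < (t ++ d :: r').length := by
        have := hC.1
        simp only [List.length_append, List.length_cons, List.length_nil] at this ⊢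
        omega
      rw [hassoc, decide_eq_true ⟨hlen, h5, h6⟩]
    · rw [if_neg hC]
      rcases r' with _ | ⟨e, r''⟩
      · simp only [List.foldl_nil]
        have hnc : ¬ (m.length < (t ++ [d]).length ∧ (5 : Int) ∈ t ++ [d] ∧ (6 : Int) ∈ t ++ [d]) := by
          intro hc
          exact hC ⟨hc.1, (setlen_mixed (t ++ [d]) htd).mpr ⟨hc.2.1, hc.2.2⟩⟩
        rw [decide_eq_false hnc]
      · have htdL : ∀ x ∈ t ++ [d], isL x := by
          intro x hx; unfold isL; exact decide_eq_true (htd x hx)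
        rw [ih m (t ++ [d]) (by simp) (fun x hx => hr x (by simp [hx])) htdL]
        have hassoc : (t ++ [d]) ++ e :: r'' = t ++ d :: e :: r'' := by simp
        rw [hassoc]

lemma fold_runs (l : List Int) : ∀ (m : List Int),
    (let st := l.foldl luckyStep (m, [], false);
     if st.2.2 then st.2.1 else st.1) = aSel m (refRuns l) := by
  have H : ∀ (n : Nat) (l : List Int), l.length = n → ∀ (m : List Int),
      (let st := l.foldl luckyStep (m, [], false);
       if st.2.2 then st.2.1 else st.1) = aSel m (refRuns l) := by
    intro n
    induction n using Nat.strong_induction_on with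
    | _ n ih =>
      intro l hn m
      rcases l with _ | ⟨d, t⟩
      · simp [aSel, refRuns]
      · by_cases hd : isL d
        · -- leading lucky run
          have hd' : d = 5 ∨ d = 6 := by simpa [isL] using hd
          have hrall : ∀ x ∈ d :: t.takeWhile isL, isL x := by
            intro x hx
            rcases List.mem_cons.mp hx with h | h
            · subst h; exact hd
            · exact List.mem_takeWhile_imp h
          have hsplit : d :: t = (d :: t.takeWhile isL) ++ t.dropWhile isL := by
            simp [List.takeWhile_append_dropWhile]
          have href : refRuns (d :: t) = (d :: t.takeWhile isL) :: refRuns (t.dropWhile isL) := by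
            rw [refRuns, if_pos hd]
          rw [href]
          conv_lhs => rw [hsplit]
          simp only [List.foldl_append]
          rw [foldl_step_run (d :: t.takeWhile isL) m [] (by simp) hrall (by simp)]
          simp only [List.nil_append]
          have hsel : aSel m ((d :: t.takeWhile isL) :: refRuns (t.dropWhile isL)) =
              aSel (if (5 : Int) ∈ d :: t.takeWhile isL ∧ (6 : Int) ∈ d :: t.takeWhile isL ∧
                      m.length < (d :: t.takeWhile isL).length
                    then d :: t.takeWhile isL else m) (refRuns (t.dropWhile isL)) := by
            simp [aSel]
          rw [hsel]
          have hcond : (decide (m.length < (d :: t.takeWhile isL).length ∧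
                (5 : Int) ∈ d :: t.takeWhile isL ∧ (6 : Int) ∈ d :: t.takeWhile isL) = true) ↔
              ((5 : Int) ∈ d :: t.takeWhile isL ∧ (6 : Int) ∈ d :: t.takeWhile isL ∧
                m.length < (d :: t.takeWhile isL).length) := by
            simp only [decide_eq_true_eq]; tauto
          have harg : (if (decide (m.length < (d :: t.takeWhile isL).length ∧
                (5 : Int) ∈ d :: t.takeWhile isL ∧ (6 : Int) ∈ d :: t.takeWhile isL) : Bool) then
                  d :: t.takeWhile isL else m)
              = (if (5 : Int) ∈ d :: t.takeWhile isL ∧ (6 : Int) ∈ d :: t.takeWhile isL ∧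
                    m.length < (d :: t.takeWhile isL).length then d :: t.takeWhile isL else m) := by
            simp only [decide_eq_true_eq]
            by_cases hc : m.length < (d :: t.takeWhile isL).length ∧
                (5 : Int) ∈ d :: t.takeWhile isL ∧ (6 : Int) ∈ d :: t.takeWhile isL
            · rw [if_pos hc, if_pos (by tauto)]
            · rw [if_neg hc, if_neg (by tauto)]
          rcases hrest : t.dropWhile isL with _ | ⟨sdig, rest'⟩
          · simp only [List.foldl_nil, refRuns, aSel, List.foldl_nil]
            exact harg
          · have hsB : ¬ isL sdig := by
              have := dropWhile_head_false (p := isL) t sdig rest' hrest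
              simp [this]
            have hs' : ¬ (sdig = 5 ∨ sdig = 6) := by simpa [isL] using hsB
            simp only [List.foldl_cons]
            have hstep2 : ∀ b : Bool, luckyStep (m, d :: t.takeWhile isL, b) sdig =
                ((if b then d :: t.takeWhile isL else m), [], false) := by
              intro b; simp [luckyStep, hs']
            rw [hstep2]
            have hlt : rest'.length < n := by
              have hle := List.length_dropWhile_le (p := isL) (l := t)
              rw [hrest] at hle
              simp only [List.length_cons] at hle hn
              omega
            have href2 : refRuns (sdig :: rest') = refRuns rest' := by
              rw [refRuns, if_neg hsB]
            rw [ih rest'.length hlt rest' rfl, href2]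
            exact congrArg (fun z => aSel z (refRuns rest')) harg
        · -- separator digit
          have hd' : ¬ (d = 5 ∨ d = 6) := by simpa [isL] using hd
          have hstep : luckyStep (m, [], false) d = (m, [], false) := by
            simp [luckyStep, hd']
          simp only [List.foldl_cons, hstep]
          have href : refRuns (d :: t) = refRuns t := by rw [refRuns, if_neg hd]
          rw [href]
          exact ih t.length (by simp only [List.length_cons] at hn; omega) t rfl m
  exact H l.length l rfl

-- ---- selection ----

lemma sel_eq_bestG (rs : List (List Int)) : ∀ (m : List Int),
    aSel m rs = if m.length < (bestG rs).length then bestG rs else m := by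
  induction rs with
  | nil => intro m; simp [aSel, bestG]
  | cons r rs ih =>
    intro m
    have hstep : aSel m (r :: rs) =
        aSel (if (5 : Int) ∈ r ∧ (6 : Int) ∈ r ∧ m.length < r.length then r else m) rs := by
      simp [aSel]
    have hbg : bestG (r :: rs) =
        if (5 : Int) ∈ r ∧ (6 : Int) ∈ r ∧ (bestG rs).length ≤ r.length then r else bestG rs := rfl
    rw [hstep, hbg]
    by_cases hq : (5 : Int) ∈ r ∧ (6 : Int) ∈ r
    · rcases hq with ⟨h5, h6⟩
      by_cases hle : (bestG rs).length ≤ r.length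
      · have c2 : (5 : Int) ∈ r ∧ (6 : Int) ∈ r ∧ (bestG rs).length ≤ r.length := ⟨h5, h6, hle⟩
        rw [if_pos c2]
        by_cases hm : m.length < r.length
        · have c1 : (5 : Int) ∈ r ∧ (6 : Int) ∈ r ∧ m.length < r.length := ⟨h5, h6, hm⟩
          rw [if_pos c1, ih, if_neg (by omega), if_pos hm]
        · have c1 : ¬ ((5 : Int) ∈ r ∧ (6 : Int) ∈ r ∧ m.length < r.length) :=
            fun hc => hm hc.2.2
          rw [if_neg c1, ih, if_neg (by omega), if_neg hm]
      · have c2 : ¬ ((5 : Int) ∈ r ∧ (6 : Int) ∈ r ∧ (bestG rs).length ≤ r.length) :=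
          fun hc => hle hc.2.2
        rw [if_neg c2]
        by_cases hm : m.length < r.length
        · have c1 : (5 : Int) ∈ r ∧ (6 : Int) ∈ r ∧ m.length < r.length := ⟨h5, h6, hm⟩
          rw [if_pos c1, ih, if_pos (by omega), if_pos (by omega)]
        · have c1 : ¬ ((5 : Int) ∈ r ∧ (6 : Int) ∈ r ∧ m.length < r.length) :=
            fun hc => hm hc.2.2
          rw [if_neg c1, ih]
    · have c1 : ¬ ((5 : Int) ∈ r ∧ (6 : Int) ∈ r ∧ m.length < r.length) :=
        fun hc => hq ⟨hc.1, hc.2.1⟩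
      have c2 : ¬ ((5 : Int) ∈ r ∧ (6 : Int) ∈ r ∧ (bestG rs).length ≤ r.length) :=
        fun hc => hq ⟨hc.1, hc.2.1⟩
      rw [if_neg c1, if_neg c2, ih]

lemma bestG_mixed (rs : List (List Int)) :
    bestG rs = [] ∨ ((5 : Int) ∈ bestG rs ∧ (6 : Int) ∈ bestG rs) := by
  induction rs with
  | nil => left; rfl
  | cons r rs ih =>
    have hbg : bestG (r :: rs) =
        if (5 : Int) ∈ r ∧ (6 : Int) ∈ r ∧ (bestG rs).length ≤ r.length then r else bestG rs := rfl
    rw [hbg]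
    by_cases h : (5 : Int) ∈ r ∧ (6 : Int) ∈ r ∧ (bestG rs).length ≤ r.length
    · rw [if_pos h]; right; exact ⟨h.1, h.2.1⟩
    · rw [if_neg h]; exact ih

-- ---- refRuns structure ----

lemma refRuns_all (l : List Int) (hne : l ≠ []) (hl : ∀ x ∈ l, isL x) : refRuns l = [l] := by
  match l, hne with
  | d :: t, _ =>
    have hd : isL d := hl d (by simp)
    have ht : t.takeWhile isL = t := List.takeWhile_eq_self_iff.mpr (fun x hx => hl x (by simp [hx]))
    have ht' : t.dropWhile isL = [] := List.dropWhile_eq_nil_iff.mpr (fun x hx => hl x (by simp [hx]))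
    rw [refRuns]
    simp [hd, ht, ht', refRuns]

lemma refRuns_sep_cons (s : Int) (hs : ¬ isL s) (ys : List Int) :
    refRuns (s :: ys) = refRuns ys := by
  rw [refRuns, if_neg hs]

lemma refRuns_append_sep (s : Int) (hs : ¬ isL s) (ys : List Int) : ∀ (xs : List Int),
    refRuns (xs ++ s :: ys) = refRuns xs ++ refRuns ys := by
  have H : ∀ (n : Nat) (xs : List Int), xs.length = n →
      refRuns (xs ++ s :: ys) = refRuns xs ++ refRuns ys := by
    intro n
    induction n using Nat.strong_induction_on with
    | _ n ih =>
      intro xs hn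
      rcases xs with _ | ⟨x, t⟩
      · rw [List.nil_append, refRuns_sep_cons s hs ys]
        simp [refRuns]
      · by_cases hx : isL x
        · rw [List.cons_append, refRuns, if_pos hx, refRuns, if_pos hx]
          by_cases hall : (t.takeWhile isL).length = t.length
          · have htake : t.takeWhile isL = t :=
              (List.takeWhile_sublist (p := isL)).eq_of_length hall
            have hallP : ∀ x ∈ t, isL x := by
              intro x hx'
              exact List.mem_takeWhile_imp (htake ▸ hx')
            have hdropnil : t.dropWhile isL = [] := List.dropWhile_eq_nil_iff.mpr hallP
            have ht1 : (t ++ s :: ys).takeWhile isL = t := by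
              rw [List.takeWhile_append, if_pos hall, List.takeWhile_cons_of_neg hs]
              simp
            have ht2 : (t ++ s :: ys).dropWhile isL = s :: ys := by
              rw [List.dropWhile_append, if_pos (by simp [hdropnil]),
                List.dropWhile_cons_of_neg hs]
            rw [ht1, ht2, refRuns_sep_cons s hs ys, htake, hdropnil]
            simp [refRuns]
          · have hdropne : t.dropWhile isL ≠ [] := by
              intro hnil
              exact hall (by
                rw [List.takeWhile_eq_self_iff.mpr (List.dropWhile_eq_nil_iff.mp hnil)])
            have ht1 : (t ++ s :: ys).takeWhile isL = t.takeWhile isL := by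
              rw [List.takeWhile_append, if_neg hall]
            have ht2 : (t ++ s :: ys).dropWhile isL = t.dropWhile isL ++ s :: ys := by
              rw [List.dropWhile_append, if_neg (by simpa using hdropne)]
            rw [ht1, ht2]
            have hlt : (t.dropWhile isL).length < n := by
              have := List.length_dropWhile_le (p := isL) (l := t)
              simp only [List.length_cons] at hn
              omega
            rw [ih _ hlt (t.dropWhile isL) rfl]
            simp
        · rw [List.cons_append, refRuns_sep_cons x hx, refRuns_sep_cons x hx]
          exact ih t.length (by simp only [List.length_cons] at hn; omega) t rfl
  intro xs
  exact H xs.length xs rfl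

lemma refRuns_reverse (l : List Int) :
    refRuns l.reverse = (refRuns l).reverse.map List.reverse := by
  have H : ∀ (n : Nat) (l : List Int), l.length = n →
      refRuns l.reverse = (refRuns l).reverse.map List.reverse := by
    intro n
    induction n using Nat.strong_induction_on with
    | _ n ih =>
      intro l hn
      rcases List.eq_nil_or_concat l with rfl | ⟨ys, x, rfl⟩
      · simp [refRuns]
      · rw [List.concat_eq_append, List.reverse_append, List.reverse_singleton,
          List.singleton_append]
        by_cases hx : isL x
        · rw [refRuns, if_pos hx]
          rcases hrest : ys.reverse.dropWhile isL with _ | ⟨sB, rest'⟩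
          · -- the whole list is one lucky run
            have hallrev : ∀ z ∈ ys.reverse, isL z := List.dropWhile_eq_nil_iff.mp hrest
            have htake : ys.reverse.takeWhile isL = ys.reverse :=
              List.takeWhile_eq_self_iff.mpr hallrev
            have hally : ∀ z ∈ ys ++ [x], isL z := by
              intro z hz
              rcases List.mem_append.mp hz with h | h
              · exact hallrev z (List.mem_reverse.mpr h)
              · simp at h; subst h; exact hx
            rw [refRuns_all (ys ++ [x]) (by simp) hally, htake]
            simp [refRuns]
          · have hsB : ¬ isL sB := by
              simp [dropWhile_head_false (p := isL) ys.reverse sB rest' hrest]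
            have hdecomp : ys ++ [x] =
                rest'.reverse ++ sB :: ((ys.reverse.takeWhile isL).reverse ++ [x]) := by
              have h1 : ys.reverse = ys.reverse.takeWhile isL ++ (sB :: rest') := by
                rw [← hrest, List.takeWhile_append_dropWhile]
              have h2 : ys = (ys.reverse.takeWhile isL ++ (sB :: rest')).reverse := by
                rw [← h1, List.reverse_reverse]
              conv_lhs => rw [h2]
              simp
            have hallt : ∀ z ∈ (ys.reverse.takeWhile isL).reverse ++ [x], isL z := by
              intro z hz
              rcases List.mem_append.mp hz with h | h
              · exact List.mem_takeWhile_imp (List.mem_reverse.mp h)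
              · simp at h; subst h; exact hx
            rw [refRuns_sep_cons sB hsB rest', hdecomp,
              refRuns_append_sep sB hsB _ rest'.reverse,
              refRuns_all _ (by simp) hallt]
            have hlt : rest'.reverse.length < n := by
              have := List.length_dropWhile_le (p := isL) (l := ys.reverse)
              rw [hrest] at this
              simp only [List.length_cons, List.length_reverse, List.length_append,
                List.length_concat, List.length_singleton] at this hn ⊢
              omega
            have hih := ih rest'.reverse.length hlt rest'.reverse rfl
            rw [List.reverse_reverse] at hih
            rw [hih]
            simp
        · rw [refRuns_sep_cons x hx, refRuns_append_sep x hx [] ys]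
          have h0 : refRuns ([] : List Int) = [] := by rw [refRuns]
          rw [h0]
          rw [ih ys.length (by simp only [List.length_concat] at hn; omega) ys rfl]
          simp
  exact H l.length l rfl

-- ---- B's folds ----

lemma digitChar_56 (n : Nat) (h : n < 10) :
    ((Nat.digitChar n = '5') ∨ (Nat.digitChar n = '6')) ↔ (n = 5 ∨ n = 6) := by
  interval_cases n <;> simp [Nat.digitChar]

lemma char_fold_comm (v : List Int) : ∀ (st : List (List Int) × List Int),
    (∀ d ∈ v, 0 ≤ d ∧ d < 10) →
    (v.map (fun d => Nat.digitChar d.toNat)).foldl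
      (fun (st : List (List Int) × List Int) ch =>
        if ch = '5' ∨ ch = '6' then (st.1, st.2 ++ [(PySem.Int.ofChars? [ch]).getD 0])
        else (if st.2 ≠ [] then st.1 ++ [st.2] else st.1, [])) st
    = v.foldl bStep st := by
  induction v with
  | nil => intro st _; rfl
  | cons d v' ih =>
    intro st hb
    have hd := hb d (by simp)
    have hd10 : d.toNat < 10 := by omega
    simp only [List.map_cons, List.foldl_cons]
    by_cases hL : isL d
    · have hd56 : d = 5 ∨ d = 6 := by simpa [isL] using hL
      have hch : Nat.digitChar d.toNat = '5' ∨ Nat.digitChar d.toNat = '6' :=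
        (digitChar_56 d.toNat hd10).mpr (by omega)
      have hval : (PySem.Int.ofChars? [Nat.digitChar d.toNat]).getD 0 = d := by
        rcases hd56 with rfl | rfl <;> decide
      rw [if_pos hch, hval]
      have hbstep : bStep st d = (st.1, st.2 ++ [d]) := by
        simp [bStep, hL]
      rw [hbstep]
      exact ih _ (fun x hx => hb x (by simp [hx]))
    · have hd56 : ¬ (d = 5 ∨ d = 6) := by simpa [isL] using hL
      have hch : ¬ (Nat.digitChar d.toNat = '5' ∨ Nat.digitChar d.toNat = '6') := by
        intro hc
        exact hd56 (by have := (digitChar_56 d.toNat hd10).mp hc; omega)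
      rw [if_neg hch]
      have hbstep : bStep st d = (if st.2 ≠ [] then st.1 ++ [st.2] else st.1, []) := by
        simp [bStep, hL]
      rw [hbstep]
      exact ih _ (fun x hx => hb x (by simp [hx]))

lemma bStep_run (r : List Int) : ∀ (rs : List (List Int)) (cur : List Int), (∀ x ∈ r, isL x) →
    r.foldl bStep (rs, cur) = (rs, cur ++ r) := by
  induction r with
  | nil => intro rs cur _; simp
  | cons d r ih =>
    intro rs cur h
    have hd : isL d := h d (by simp)
    simp only [List.foldl_cons, bStep, hd, if_pos, reduceIte]
    rw [ih rs (cur ++ [d]) (fun x hx => h x (by simp [hx]))]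
    simp

lemma builder_eq (v : List Int) : ∀ (rs : List (List Int)),
    (let st := v.foldl bStep (rs, []);
     if st.2 ≠ [] then st.1 ++ [st.2] else st.1) = rs ++ refRuns v := by
  have H : ∀ (n : Nat) (v : List Int), v.length = n → ∀ (rs : List (List Int)),
      (let st := v.foldl bStep (rs, []);
       if st.2 ≠ [] then st.1 ++ [st.2] else st.1) = rs ++ refRuns v := by
    intro n
    induction n using Nat.strong_induction_on with
    | _ n ih =>
      intro v hn rs
      rcases v with _ | ⟨d, t⟩
      · simp [refRuns]
      · by_cases hd : isL d
        · have hrall : ∀ x ∈ d :: t.takeWhile isL, isL x := by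
            intro x hx
            rcases List.mem_cons.mp hx with h | h
            · subst h; exact hd
            · exact List.mem_takeWhile_imp h
          have hsplit : d :: t = (d :: t.takeWhile isL) ++ t.dropWhile isL := by
            simp [List.takeWhile_append_dropWhile]
          rw [refRuns, if_pos hd]
          conv_lhs => rw [hsplit]
          simp only [List.foldl_append]
          rw [bStep_run (d :: t.takeWhile isL) rs [] hrall]
          simp only [List.nil_append]
          rcases hrest : t.dropWhile isL with _ | ⟨sB, rest'⟩
          · simp [refRuns]
          · have hsB : ¬ isL sB := by
              simp [dropWhile_head_false (p := isL) t sB rest' hrest]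
            have hsB' : ¬ (sB = 5 ∨ sB = 6) := by simpa [isL] using hsB
            simp only [List.foldl_cons]
            have hstep : bStep (rs, d :: t.takeWhile isL) sB = (rs ++ [d :: t.takeWhile isL], []) := by
              simp [bStep, isL, hsB']
            rw [hstep]
            have hlt : rest'.length < n := by
              have := List.length_dropWhile_le (p := isL) (l := t)
              rw [hrest] at this
              simp only [List.length_cons] at this hn
              omega
            rw [ih rest'.length hlt rest' rfl (rs ++ [d :: t.takeWhile isL]),
              refRuns_sep_cons sB hsB rest']
            simp
        · have hd' : ¬ (d = 5 ∨ d = 6) := by simpa [isL] using hd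
          have hstep : bStep (rs, []) d = (rs, []) := by simp [bStep, isL, hd']
          simp only [List.foldl_cons, hstep]
          rw [refRuns_sep_cons d hd t]
          exact ih t.length (by simp only [List.length_cons] at hn; omega) t rfl rs
  intro rs
  exact H v.length v rfl rs

lemma sel_rev (M : List (List Int)) :
    (M.reverse.map List.reverse).foldl
      (fun best run => if (5 : Int) ∈ run ∧ (6 : Int) ∈ run ∧ best.length ≤ run.length then run else best)
      []
    = (bestG M).reverse := by
  induction M with
  | nil => simp [bestG]
  | cons r M ih =>
    simp only [List.reverse_cons, List.map_append, List.map_cons, List.map_nil,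
      List.foldl_append, List.foldl_cons, List.foldl_nil, ih]
    have hbg : bestG (r :: M) =
        if (5 : Int) ∈ r ∧ (6 : Int) ∈ r ∧ (bestG M).length ≤ r.length then r else bestG M := rfl
    rw [hbg]
    by_cases h : (5 : Int) ∈ r ∧ (6 : Int) ∈ r ∧ (bestG M).length ≤ r.length
    · rw [if_pos (by simpa using h), if_pos h]
    · rw [if_neg (by simpa using h), if_neg h]

-- ---- value reconstruction ----

lemma horner_reverse (u : List Int) :
    u.reverse.foldl (fun v d => v * 10 + d) 0 = reconV u := by
  induction u with
  | nil => rfl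
  | cons d u ih =>
    rw [List.reverse_cons, List.foldl_append, ih]
    show reconV u * 10 + d = reconV (d :: u)
    have h : reconV (d :: u) = d + 10 * reconV u := rfl
    rw [h]; ring

lemma enum_recon (u : List Int) : ∀ (s a : Int), 0 ≤ s →
    (PySem.List.enumerate u s).foldl (fun acc p => acc + p.2 * 10 ^ p.1.toNat) a
      = a + 10 ^ s.toNat * reconV u := by
  induction u with
  | nil => intro s a _; simp [PySem.List.enumerate, reconV]
  | cons d u ih =>
    intro s a hs
    rw [show PySem.List.enumerate (d :: u) s = (s, d) :: PySem.List.enumerate u (s + 1) from rfl]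
    simp only [List.foldl_cons]
    rw [ih (s+1) _ (by omega)]
    have hsn : (s + 1).toNat = s.toNat + 1 := by omega
    simp only [reconV, List.foldr_cons, hsn, pow_succ]
    ring

-- ===== VERDICT =====
theorem lucky_series_spec : Claim_equal_lucky_series := by
  unfold Claim_equal_lucky_series
  intro num _
  unfold Spec_lucky_series
  by_cases hpos : 0 < num
  · -- positive input: compare both sides through the decimal digit list
    have hb : ∀ d ∈ (Nat.digits 10 num.toNat).map Int.ofNat, 0 ≤ d ∧ d < 10 := by
      intro d hd
      rcases List.mem_map.mp hd with ⟨k, hk, rfl⟩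
      have hk10 := Nat.digits_lt_base (by norm_num) hk
      exact ⟨Int.ofNat_nonneg k, by rw [Int.ofNat_eq_natCast]; exact_mod_cast hk10⟩
    set ds := (Nat.digits 10 num.toNat).map Int.ofNat with hds
    have hAeq : lucky_series num = reconV (aSel [0] (refRuns ds)) := by
      unfold lucky_series
      rw [digitsRev_eq num hpos, ← hds]
      have hfr' : (if (ds.foldl luckyStep ([0], [], false)).2.2 = true
          then (ds.foldl luckyStep ([0], [], false)).2.1
          else (ds.foldl luckyStep ([0], [], false)).1) = aSel [0] (refRuns ds) :=
        fold_runs ds [0]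
      show List.foldl (fun acc p => acc + p.2 * 10 ^ p.1.toNat) 0
          (PySem.List.enumerate (if (List.foldl luckyStep ([0], [], false) ds).2.2 = true
            then (List.foldl luckyStep ([0], [], false) ds).2.1
            else (List.foldl luckyStep ([0], [], false) ds).1)) = reconV (aSel [0] (refRuns ds))
      rw [hfr', enum_recon (aSel [0] (refRuns ds)) 0 0 (le_refl 0)]
      norm_num
    have hBeq : lucky_series_alt num = reconV (bestG (refRuns ds)) := by
      unfold lucky_series_alt
      rw [if_neg (by omega)]
      have hlist : (PySem.Int.toStr num).toList =
          (ds.reverse).map (fun d => Nat.digitChar d.toNat) := by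
        rw [PySem.Int.toList_toStr, toChars_eq num hpos, hds]
        simp [List.map_reverse, List.map_map, Function.comp]
      rw [hlist, char_fold_comm (ds.reverse) ([], []) (fun d hd => hb d (List.mem_reverse.mp hd))]
      have hbu : (if ((ds.reverse).foldl bStep ([], [])).2 ≠ []
          then ((ds.reverse).foldl bStep ([], [])).1 ++ [((ds.reverse).foldl bStep ([], [])).2]
          else ((ds.reverse).foldl bStep ([], [])).1) = [] ++ refRuns ds.reverse :=
        builder_eq ds.reverse []
      show List.foldl (fun v d => v * 10 + d) 0
          (List.foldl (fun best run =>
              if (5 : Int) ∈ run ∧ (6 : Int) ∈ run ∧ best.length ≤ run.length then run else best) []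
            (if (List.foldl bStep ([], []) ds.reverse).2 ≠ []
             then (List.foldl bStep ([], []) ds.reverse).1 ++ [(List.foldl bStep ([], []) ds.reverse).2]
             else (List.foldl bStep ([], []) ds.reverse).1)) = reconV (bestG (refRuns ds))
      rw [hbu]
      simp only [List.nil_append]
      rw [refRuns_reverse ds, sel_rev (refRuns ds), horner_reverse]
    rw [hAeq, hBeq, sel_eq_bestG]
    rcases bestG_mixed (refRuns ds) with hnil | ⟨h5, h6⟩
    · rw [hnil]
      norm_num [reconV]
    · have h2 := two_le_length_of_mixed _ h5 h6
      rw [if_pos (by simp only [List.length_singleton]; omega)]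
  · -- num ≤ 0: the extraction loop never runs in A, and B's guard fires
    have hA0 : lucky_series num = 0 := by
      unfold lucky_series
      rw [luckyDigitsRev, dif_neg hpos]
      simp [PySem.List.enumerate]
    rw [hA0]
    unfold lucky_series_alt
    rw [if_pos (by omega)]
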